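-- pv_equiv track=rewrite | github.com/hkl690/Python_CodePath_Sessions | PythonPractice/unit2sessions_sept.py | unique_souvenir_counts
-- ===== SOURCE A (Python) =====
-- def unique_souvenir_counts(souvenirs):
--     # create a dictionary to count souvenirs
--     count_dict = {}
--     for souv in souvenirs:
--         if souv in count_dict:
--             count_dict[souv] += 1
--         else:
--             count_dict[souv] = 1
--
--     # create a set to track the counts seen
--     seen_counts = set()
--
--     # check if the counts are unique
--     for count in count_dict.values():
--         if count in seen_counts:
--             return False
--         seen_counts.add(count)
--
--     return True
-- ===== SOURCE B (Python) =====
-- def unique_souvenir_counts(souvenirs):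
--     # no dict, no seen-set: sort, collect run lengths as the frequencies,
--     # sort those and test that no two neighbours are equal
--     ordered = sorted(souvenirs)
--     counts = []
--     run = 0
--     prev = None
--     for s in ordered:
--         if run > 0 and prev == s:
--             run += 1
--         else:
--             if run > 0:
--                 counts.append(run)
--             run = 1
--             prev = s
--     if run > 0:
--         counts.append(run)
--     counts.sort()
--     return all(x != y for x, y in zip(counts, counts[1:]))
-- ===== Notes on version B (the rewrite author's own statement) =====
-- stated objective: alternative
-- what changed: B drops A's hash counting and early-exit seen-set scan entirely: it sorts the list, collects the run lengths of equal neighbours as the frequencies in one pass, sorts those counts and declares them unique iff no two sorted neighbours are equal.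
import Mathlib
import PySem

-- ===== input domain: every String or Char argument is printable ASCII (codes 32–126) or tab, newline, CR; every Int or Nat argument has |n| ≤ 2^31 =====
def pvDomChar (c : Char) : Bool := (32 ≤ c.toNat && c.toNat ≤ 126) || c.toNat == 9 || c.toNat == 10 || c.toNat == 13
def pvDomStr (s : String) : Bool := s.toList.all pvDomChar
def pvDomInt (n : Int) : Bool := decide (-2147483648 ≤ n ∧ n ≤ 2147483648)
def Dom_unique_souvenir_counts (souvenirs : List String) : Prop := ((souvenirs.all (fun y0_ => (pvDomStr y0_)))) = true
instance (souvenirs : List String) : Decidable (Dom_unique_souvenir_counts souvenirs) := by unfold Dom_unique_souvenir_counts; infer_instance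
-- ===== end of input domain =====

-- B replaces A's hash counting + early-exit seen-set scan by sort, run-length
-- collection, and an adjacent-neighbour comparison on the sorted counts
-- (alternative algorithm; no speed claim).

-- ===== PORT A =====
-- the second Python loop: early return False on a repeated count, else add to seen_counts
def pvSeenLoop : List Int → PySem.Set Int → Bool
  | [], _ => true
  | c :: rest, seen =>
      if PySem.Set.contains seen c then false
      else pvSeenLoop rest (PySem.Set.add seen c)

def unique_souvenir_counts (souvenirs : List String) : Bool :=
  let count_dict : PySem.Dict String Int := souvenirs.foldl
    (fun d souv =>
      if d.contains souv then d.insert souv (d.getD souv 0 + 1)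
      else d.insert souv 1)
    PySem.Dict.empty
  pvSeenLoop count_dict.values PySem.Set.empty

-- ===== PORT B =====
-- body of Source B's for-loop over the sorted list, state = (counts, run, prev)
def pvRunStep : List Int × Int × Option String → String → List Int × Int × Option String
  | (counts, run, prev), s =>
      if 0 < run ∧ prev = some s then (counts, run + 1, prev)
      else ((if 0 < run then counts ++ [run] else counts), 1, some s)

def unique_souvenir_counts_alt (souvenirs : List String) : Bool :=
  let ordered := PySem.List.sorted souvenirs (fun x => x) false
  let st := ordered.foldl pvRunStep ([], 0, none)
  let counts0 := if 0 < st.2.1 then st.1 ++ [st.2.1] else st.1   -- trailing 'if run > 0: counts.append(run)'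
  let counts := PySem.List.sorted counts0 (fun x => x) false
  -- all(x != y for x, y in zip(counts, counts[1:])); counts[1:] = drop 1 (nonnegative slice)
  (counts.zip (counts.drop 1)).all (fun p => p.1 != p.2)

-- ===== PRECONDITION & SPEC =====
def Spec_unique_souvenir_counts (souvenirs : List String) (out : Bool) : Prop := out = unique_souvenir_counts_alt souvenirs
instance (souvenirs : List String) (out : Bool) : Decidable (Spec_unique_souvenir_counts souvenirs out) := by unfold Spec_unique_souvenir_counts; infer_instance

-- ===== CLAIM (what is proved, stated in full; the proofs are below) =====
def Claim_equal_unique_souvenir_counts : Prop := ∀ (souvenirs : List String), Dom_unique_souvenir_counts souvenirs → Spec_unique_souvenir_counts souvenirs (unique_souvenir_counts souvenirs)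

-- ===== LEMMAS AND PROOFS =====

-- A's counting step coincides with the standard insert/getD counting step
lemma pvStep_eq (d : PySem.Dict String Int) (s : String) :
    (if d.contains s then d.insert s (d.getD s 0 + 1) else d.insert s 1)
      = d.insert s (d.getD s 0 + 1) := by
  by_cases h : d.contains s = true
  · simp [h]
  · simp only [Bool.not_eq_true] at h
    rw [if_neg (by simp [h]), PySem.Dict.getD_of_not_contains d 0 h]
    norm_num

-- A's second loop decides "no duplicates and nothing already seen"
lemma pvSeenLoop_eq (cs : List Int) (seen : PySem.Set Int) :
    pvSeenLoop cs seen = decide (cs.Nodup ∧ ∀ c ∈ cs, c ∉ seen) := by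
  induction cs generalizing seen with
  | nil => simp [pvSeenLoop]
  | cons c rest ih =>
    by_cases h : c ∈ seen
    · rw [pvSeenLoop, PySem.Set.contains_eq_decide, if_pos (by simp [h])]
      symm; rw [decide_eq_false_iff_not]
      rintro ⟨-, hall⟩; exact hall c (by simp) h
    · rw [pvSeenLoop, PySem.Set.contains_eq_decide]
      simp only [h, decide_false, ih]
      apply decide_eq_decide.mpr
      simp only [List.nodup_cons, List.mem_cons, PySem.Set.mem_add]
      constructor
      · rintro ⟨hn, hall⟩
        refine ⟨⟨fun hc => ?_, hn⟩, fun x hx hs => ?_⟩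
        · exact hall c hc (Or.inr rfl)
        · rcases hx with rfl | hx
          · exact h hs
          · exact hall x hx (Or.inl hs)
      · rintro ⟨⟨hcr, hn⟩, hall⟩
        refine ⟨hn, fun x hx hs => ?_⟩
        rcases hs with hs | rfl
        · exact hall x (Or.inr hx) hs
        · exact hcr hx

-- B's zip-with-tail scan decides the adjacent-distinct chain
lemma pvZipAdj (l : List Int) :
    ((l.zip (l.drop 1)).all (fun p => p.1 != p.2)) = decide (List.IsChain (· ≠ ·) l) := by
  induction l with
  | nil => simp
  | cons a l ih =>
    cases l with
    | nil => simp
    | cons b t =>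
      simp only [List.drop_succ_cons, List.drop_zero, List.zip_cons_cons, List.all_cons]
      have ih' := ih
      simp only [List.drop_succ_cons, List.drop_zero] at ih'
      rw [ih']
      by_cases h : a = b <;> simp [List.isChain_cons_cons, h]

-- on an ascending (Pairwise ≤) list, adjacent-distinct is exactly Nodup
lemma pvChainNodup (l : List Int) (hs : l.Pairwise (· ≤ ·)) :
    List.IsChain (· ≠ ·) l ↔ l.Nodup := by
  constructor
  · intro hc
    have hlt : List.IsChain (· < ·) l := by
      induction l with
      | nil => exact List.IsChain.nil
      | cons a t ih =>
        cases t with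
        | nil => exact List.isChain_singleton a
        | cons b u =>
          rw [List.isChain_cons_cons] at hc ⊢
          rw [List.pairwise_cons] at hs
          exact ⟨lt_of_le_of_ne (hs.1 b (by simp)) hc.1, ih hs.2 hc.2⟩
    exact (List.isChain_iff_pairwise.mp hlt).imp ne_of_lt
  · intro hn
    exact hn.isChain

-- run lengths of a list, recursively: first run, then the rest (proof-side characterisation)
def pvRunsRec : List String → List Int
  | [] => []
  | a :: t =>
      ((t.takeWhile (fun x => x == a)).length + 1 : Int)
        :: pvRunsRec (t.dropWhile (fun x => x == a))
  termination_by l => l.length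
  decreasing_by
    simp only [List.length_cons]
    exact Nat.lt_succ_of_le (List.length_dropWhile_le _ _)

-- B's fold from a live run (run > 0, prev = some p) produces: finished counts,
-- the current run extended by the leading p's, then the runs of the remainder
lemma pvFoldRun (t : List String) (counts : List Int) (run : Int) (p : String)
    (hr : 0 < run) :
    (let st := t.foldl pvRunStep (counts, run, some p)
     if 0 < st.2.1 then st.1 ++ [st.2.1] else st.1)
      = counts ++ (run + (t.takeWhile (fun x => x == p)).length)
          :: pvRunsRec (t.dropWhile (fun x => x == p)) := by
  induction t generalizing counts run p with
  | nil => simp [hr, pvRunsRec]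
  | cons s t ih =>
    by_cases h : s = p
    · subst h
      rw [List.foldl_cons, show pvRunStep (counts, run, some s) s = (counts, run + 1, some s) by
            simp [pvRunStep, hr]]
      rw [ih counts (run + 1) s (by omega)]
      simp only [List.takeWhile_cons, beq_self_eq_true, if_true, List.dropWhile_cons,
        List.length_cons]
      push_cast
      ring_nf
    · rw [List.foldl_cons, show pvRunStep (counts, run, some p) s
            = (counts ++ [run], 1, some s) by
            simp [pvRunStep, hr, Ne.symm h]]
      rw [ih (counts ++ [run]) 1 s (by omega)]
      have hsp : (s == p) = false := by simp [h]
      simp only [List.takeWhile_cons, hsp, List.dropWhile_cons, Bool.false_eq_true, if_false,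
        List.length_nil, pvRunsRec]
      simp only [List.append_assoc, List.cons_append, List.nil_append]
      norm_num
      ring_nf

-- B's whole fold computes the run lengths
lemma pvFold_eq_runsRec (l : List String) :
    (let st := l.foldl pvRunStep ([], 0, none)
     if 0 < st.2.1 then st.1 ++ [st.2.1] else st.1) = pvRunsRec l := by
  cases l with
  | nil => simp [pvRunsRec]
  | cons a t =>
    rw [List.foldl_cons, show pvRunStep ([], 0, none) a = ([], 1, some a) by
          simp [pvRunStep]]
    rw [pvFoldRun t [] 1 a (by norm_num)]
    simp [pvRunsRec]
    ring_nf

-- in a sorted tail whose elements all dominate a, dropping the leading a's removes every a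
lemma pvNotMem_dropWhile (a : String) (t : List String) (ht : t.Pairwise (· ≤ ·))
    (ha : ∀ x ∈ t, a ≤ x) : a ∉ t.dropWhile (fun x => x == a) := by
  induction t with
  | nil => simp
  | cons b t' ih =>
    rw [List.pairwise_cons] at ht
    by_cases hb : (b == a) = true
    · rw [List.dropWhile_cons, if_pos hb]
      exact ih ht.2 (fun x hx => ha x (by simp [hx]))
    · rw [List.dropWhile_cons, if_neg hb]
      intro hmem
      rcases List.mem_cons.mp hmem with hba | hmem'
      · exact hb (by simp [hba])
      · have h1 : a ≤ b := ha b (by simp)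
        have h2 : b ≤ a := ht.1 a hmem'
        exact hb (by simp [le_antisymm h2 h1])

-- run lengths of a sorted list are (a permutation of) the per-distinct-element counts
lemma pvRunsRec_perm (l : List String) (hs : l.Pairwise (· ≤ ·)) :
    (pvRunsRec l).Perm
      ((PySem.Set.ofList l).map (fun s => (l.count s : Int))) := by
  induction l using pvRunsRec.induct with
  | case1 => simp [pvRunsRec]
  | case2 a t ih =>
    rw [List.pairwise_cons] at hs
    obtain ⟨ha, ht⟩ := hs
    set tw := t.takeWhile (fun x => x == a) with htw
    set td := t.dropWhile (fun x => x == a) with htd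
    have hsplit : tw ++ td = t := List.takeWhile_append_dropWhile
    have htw_all : ∀ x ∈ tw, x = a := by
      intro x hx
      have := List.mem_takeWhile_imp hx
      simpa using this
    have htd_pw : td.Pairwise (· ≤ ·) := ht.sublist (List.dropWhile_sublist _)
    have hand : a ∉ td := pvNotMem_dropWhile a t ht ha
    have hmem : ∀ x, x ∈ a :: t ↔ x = a ∨ x ∈ td := by
      intro x
      constructor
      · intro hx
        rcases List.mem_cons.mp hx with rfl | hx
        · exact Or.inl rfl
        · rw [← hsplit] at hx
          rcases List.mem_append.mp hx with hx | hx
          · exact Or.inl (htw_all x hx)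
          · exact Or.inr hx
      · rintro (rfl | hx)
        · simp
        · have : x ∈ t := by rw [← hsplit]; exact List.mem_append.mpr (Or.inr hx)
          simp [this]
    have hxne : ∀ x ∈ td, x ≠ a := fun x hx hxa => hand (hxa ▸ hx)
    -- counts in a :: t
    have hcount_a : ((a :: t).count a : Int) = (tw.length : Int) + 1 := by
      have h1 : tw.count a = tw.length :=
        List.count_eq_length.mpr (fun b hb => ((htw_all b hb).symm ▸ rfl))
      have h2 : td.count a = 0 := List.count_eq_zero.mpr hand
      have : (a :: t).count a = t.count a + 1 := by simp
      rw [this, ← hsplit, List.count_append, h1, h2]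
      push_cast; ring
    have hcount_ne : ∀ x ∈ td, (a :: t).count x = td.count x := by
      intro x hx
      have hxa := hxne x hx
      have h1 : tw.count x = 0 :=
        List.count_eq_zero.mpr (fun hmem' => hxa (htw_all x hmem'))
      have hax : ¬ a = x := fun hh => hxa hh.symm
      rw [← hsplit]
      simp [List.count_append, h1, hax]
    -- set-of-list permutation
    have hnd1 : (PySem.Set.ofList (a :: t) : List String).Nodup := PySem.Set.nodup_ofList _
    have hnd2 : (a :: (PySem.Set.ofList td : List String)).Nodup := by
      rw [List.nodup_cons]
      exact ⟨fun hmem' => hand ((PySem.Set.mem_ofList ..).mp hmem'),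
        PySem.Set.nodup_ofList _⟩
    have hperm_sets : (PySem.Set.ofList (a :: t) : List String).Perm
        (a :: (PySem.Set.ofList td : List String)) := by
      rw [List.perm_ext_iff_of_nodup hnd1 hnd2]
      intro x
      rw [PySem.Set.mem_ofList, hmem x, List.mem_cons, PySem.Set.mem_ofList]
    -- assemble
    have h1 : pvRunsRec (a :: t) = ((tw.length : Int) + 1) :: pvRunsRec td := by
      rw [pvRunsRec]
    have h2 : (((tw.length : Int) + 1) :: pvRunsRec td).Perm
        (((tw.length : Int) + 1)
          :: ((PySem.Set.ofList td).map (fun s => (td.count s : Int)))) :=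
      (ih htd_pw).cons _
    have h3 : (((tw.length : Int) + 1)
          :: ((PySem.Set.ofList td).map (fun s => (td.count s : Int))))
        = (a :: (PySem.Set.ofList td : List String)).map
            (fun s => ((a :: t).count s : Int)) := by
      rw [List.map_cons, hcount_a]
      congr 1
      apply (List.map_congr_left _).symm
      intro x hx
      rw [hcount_ne x ((PySem.Set.mem_ofList ..).mp hx)]
    rw [h1]
    exact h2.trans (by rw [h3]; exact (hperm_sets.map _).symm)

-- ===== VERDICT (by name: the statement is the Claim_ definition above) =====
theorem unique_souvenir_counts_spec : Claim_equal_unique_souvenir_counts := by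
  intro souvenirs _
  unfold Spec_unique_souvenir_counts unique_souvenir_counts unique_souvenir_counts_alt
  dsimp only
  rw [PySem.List.foldl_congr_mem' souvenirs _ (fun d x => d.insert x (d.getD x 0 + 1)) _
        (fun x _ d => pvStep_eq d x),
      PySem.Dict.foldl_insert_getD_add_one_eq_counter, pvSeenLoop_eq, pvZipAdj]
  set cs := (PySem.Set.ofList souvenirs : List String).map
      (fun s => (souvenirs.count s : Int)) with hcs
  have hvals : (PySem.Dict.counter souvenirs).values = cs := by
    show ((PySem.Dict.counter souvenirs).items.map (·.2)) = cs
    rw [PySem.Dict.items_counter]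
    simp [hcs, Function.comp]
  rw [hvals]
  apply decide_eq_decide.mpr
  set ordered := PySem.List.sorted souvenirs (fun x => x) false with hord
  set counts0 := (let st := ordered.foldl pvRunStep ([], 0, none)
      if 0 < st.2.1 then st.1 ++ [st.2.1] else st.1) with hc0
  rw [pvChainNodup _ (by simpa using PySem.List.sorted_pairwise counts0 (fun x => x)),
      (PySem.List.sorted_perm counts0 (fun x => x) false).nodup_iff]
  have hops : ordered.Pairwise (· ≤ ·) := by
    simpa using PySem.List.sorted_pairwise souvenirs (fun x => x)
  have hperm1 : counts0.Perm
      ((PySem.Set.ofList ordered).map (fun s => (ordered.count s : Int))) := by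
    rw [hc0, pvFold_eq_runsRec]
    exact pvRunsRec_perm ordered hops
  have hcnt : ∀ x, ordered.count x = souvenirs.count x := fun x =>
    (PySem.List.sorted_perm souvenirs (fun x => x) false).count_eq x
  have hperm2 : ((PySem.Set.ofList ordered : List String).map
      (fun s => (ordered.count s : Int))).Perm cs := by
    have hmap : (PySem.Set.ofList ordered : List String).map
        (fun s => (ordered.count s : Int))
        = (PySem.Set.ofList ordered : List String).map
          (fun s => (souvenirs.count s : Int)) := by
      apply List.map_congr_left
      intro x _
      rw [hcnt x]
    rw [hmap, hcs]
    apply List.Perm.map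
    rw [List.perm_ext_iff_of_nodup (PySem.Set.nodup_ofList _) (PySem.Set.nodup_ofList _)]
    intro x
    rw [PySem.Set.mem_ofList, PySem.Set.mem_ofList, hord, PySem.List.mem_sorted]
  rw [(hperm1.trans hperm2).nodup_iff]
  simp [PySem.Set.empty]
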